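-- pv_equiv track=rewrite | github.com/01554/TIL | code/dfs.py | dfs
-- ===== SOURCE A (Python) =====
-- def dfs(grid, row, col, visited, path):
--     if grid[row][col] == 3 and len(path) == sum(1 for row in grid for cell in row if cell == 0)+1:
--         path.append((row, col))
--         return [path]
--
--     if grid[row][col] == 1 or grid[row][col] == 3 or (row, col) in visited:
--         return []
--
--     visited.add((row, col))
--     path.append((row, col))
--
--     paths = []
--     for dr, dc in [(0, 1), (0, -1), (1, 0), (-1, 0)]:
--         new_row, new_col = row + dr, col + dc
--         if 0 <= new_row < len(grid) and 0 <= new_col < len(grid[0]) and grid[new_row][new_col] != 1: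
--             results = dfs(grid, new_row, new_col, visited, path[:])
--             paths.extend(results)
--
--     visited.remove((row, col))
--     return paths
-- ===== SOURCE B (Python) =====
-- def dfs(grid, row, col, visited, path):
--     # Iterative DFS over an explicit LIFO frame stack; free-cell count done once.
--     # Return value only: A mutates `visited`/`path`, B mutates neither.
--     free = len([c for r in grid for c in r if c == 0])
--     rows = len(grid)
--     cols = len(grid[0]) if grid else 0
--     out = []
--     stack = [(row, col, visited, path)]
--     while stack:
--         r, c, vis, p = stack.pop()
--         cell = grid[r][c]
--         if cell == 3:
--             if len(p) == free + 1:
--                 out.append(p + [(r, c)])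
--             continue
--         if cell == 1 or (r, c) in vis:
--             continue
--         vis2 = vis | {(r, c)}
--         p2 = p + [(r, c)]
--         for dr, dc in [(-1, 0), (1, 0), (0, -1), (0, 1)]:
--             nr, nc = r + dr, c + dc
--             if 0 <= nr < rows and 0 <= nc < cols and grid[nr][nc] != 1:
--                 stack.append((nr, nc, vis2, p2))
--     return out
-- ===== Notes on version B (the rewrite author's own statement) =====
-- stated objective: alternative
-- what changed: The recursive DFS (which rescans the whole grid to recount free cells at every call) is replaced by an iterative DFS over an explicit LIFO stack of (row, col, visited, path) frames, with the free-cell count and grid dimensions computed once up front.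
-- outside the precondition, e.g. on dfs([[1, 1], [1]], 0, 0, set(), []): A returns [], B returns []
import Mathlib
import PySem

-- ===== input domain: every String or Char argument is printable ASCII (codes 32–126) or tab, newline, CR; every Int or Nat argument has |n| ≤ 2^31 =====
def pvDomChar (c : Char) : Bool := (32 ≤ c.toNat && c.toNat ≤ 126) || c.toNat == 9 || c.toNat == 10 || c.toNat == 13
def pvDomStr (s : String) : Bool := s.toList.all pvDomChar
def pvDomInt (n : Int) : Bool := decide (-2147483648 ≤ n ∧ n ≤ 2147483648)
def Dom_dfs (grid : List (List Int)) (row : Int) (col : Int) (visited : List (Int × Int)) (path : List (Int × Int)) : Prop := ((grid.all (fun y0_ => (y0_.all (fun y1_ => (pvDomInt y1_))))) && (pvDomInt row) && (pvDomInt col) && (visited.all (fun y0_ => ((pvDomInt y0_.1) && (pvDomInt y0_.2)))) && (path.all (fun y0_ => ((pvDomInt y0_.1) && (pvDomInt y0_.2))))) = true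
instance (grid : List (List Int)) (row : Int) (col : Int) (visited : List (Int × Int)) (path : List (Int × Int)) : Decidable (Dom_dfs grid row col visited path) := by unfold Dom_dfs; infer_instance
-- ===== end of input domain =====

-- B replaces A's recursive DFS by an iterative DFS over an explicit LIFO frame stack, counting the
-- free cells once instead of at every call (objective: alternative).  A mutates its `visited`
-- (net zero) and `path` arguments in place; B mutates neither — the equivalence proved here is
-- about the RETURN value only.

-- termination measure machinery (proof apparatus shared by both ports' decreasing_by; not part of
-- either algorithm)
def pvIdxs (n : Nat) : List Int := PySem.List.pyRange (-(n:Int)) n 1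

def pvValid (grid : List (List Int)) : List (Int × Int) :=
  (pvIdxs grid.length).flatMap (fun r =>
    match PySem.List.pyGet? grid r with
    | none => []
    | some rw => (pvIdxs rw.length).map (fun c => (r, c)))

def pvMeas (grid : List (List Int)) (visited : List (Int × Int)) : Nat :=
  ((pvValid grid).filter (fun q => !(visited.contains q))).length

theorem pvMem_idxs {n : Nat} {i : Int} (h1 : -(n : Int) ≤ i) (h2 : i < n) : i ∈ pvIdxs n :=
  (PySem.List.mem_pyRange_one).2 ⟨h1, h2⟩

theorem pvRange_of_pyGet? {α : Type} {xs : List α} {i : Int} {x : α}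
    (h : PySem.List.pyGet? xs i = some x) : -(xs.length : Int) ≤ i ∧ i < xs.length := by
  by_contra hcon
  rw [show PySem.List.pyGet? xs i = none from ?_] at h
  · cases h
  · rw [PySem.List.pyGet?_eq_none_iff]
    simp [PySem.Raise.InRange]; omega

-- grid[r][c] (negative indices wrap, none = IndexError)
def pvCellAt (grid : List (List Int)) (r c : Int) : Option Int :=
  (PySem.List.pyGet? grid r).bind (fun rw => PySem.List.pyGet? rw c)

theorem pvMem_valid {grid : List (List Int)} {r c : Int} {x : Int}
    (h : pvCellAt grid r c = some x) : (r, c) ∈ pvValid grid := by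
  unfold pvCellAt at h
  obtain ⟨rw_, h1, h2⟩ := Option.bind_eq_some_iff.1 h
  obtain ⟨hr1, hr2⟩ := pvRange_of_pyGet? h1
  obtain ⟨hc1, hc2⟩ := pvRange_of_pyGet? h2
  refine List.mem_flatMap.2 ⟨r, pvMem_idxs hr1 hr2, ?_⟩
  simp only [h1]
  exact List.mem_map.2 ⟨c, pvMem_idxs hc1 hc2, rfl⟩

theorem pvFilterLt {α : Type} {l : List α} {p q : α → Bool} (himp : ∀ y, q y = true → p y = true)
    {a : α} (ha : a ∈ l) (hpa : p a = true) (hqa : q a = false) :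
    (l.filter q).length < (l.filter p).length := by
  induction l with
  | nil => cases ha
  | cons b l ih =>
    rcases List.mem_cons.1 ha with rfl | hm
    · have hmono : (l.filter q).length ≤ (l.filter p).length := by
        simpa [← List.countP_eq_length_filter] using
          List.countP_mono_left (p := q) (q := p) (fun y _ h => himp y h)
      simp [hpa, hqa]
      omega
    · have := ih hm
      by_cases hqb : q b = true
      · simp [hqb, himp b hqb]; omega
      · simp at hqb
        simp [hqb]
        by_cases hpb : p b = true <;> simp [hpb] <;> omega

theorem pvMeas_append_lt {grid : List (List Int)} {r c : Int} {x : Int}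
    {visited : List (Int × Int)} (h : pvCellAt grid r c = some x)
    (hc : visited.contains (r, c) = false) :
    pvMeas grid (visited ++ [(r, c)]) < pvMeas grid visited := by
  have hnm : (r, c) ∉ visited := by simpa using hc
  unfold pvMeas
  refine pvFilterLt ?_ (pvMem_valid h) ?_ ?_
  · intro y hy
    simp only [Bool.not_eq_true'] at hy ⊢
    simp only [List.contains_append, Bool.or_eq_false_iff] at hy
    exact hy.1
  · simp [hnm]
  · simp

-- ===== PORT A =====
-- sum(1 for row in grid for cell in row if cell == 0)
def pvCountFree (grid : List (List Int)) : Int :=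
  grid.foldl (fun s rw => rw.foldl (fun s cell => if cell = 0 then s + 1 else s) s) 0

-- 0 <= nr < len(grid) and 0 <= nc < len(grid[0]) and grid[nr][nc] != 1
def pvNbOk (grid : List (List Int)) (nr nc : Int) : Bool :=
  decide (0 ≤ nr) && decide (nr < (grid.length : Int)) && decide (0 ≤ nc) &&
  decide (nc < ((grid.headD []).length : Int)) && !(pvCellAt grid nr nc == some 1)

def dfs (grid : List (List Int)) (row : Int) (col : Int) (visited : List (Int × Int)) (path : List (Int × Int)) : List (List (Int × Int)) :=
  match h : pvCellAt grid row col with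
  | none => []  -- Python raises IndexError here; excluded by Pre_dfs
  | some cell =>
    if cell = 3 ∧ (path.length : Int) = pvCountFree grid + 1 then
      [path ++ [(row, col)]]
    else if hv : cell = 1 ∨ cell = 3 ∨ visited.contains (row, col) = true then
      []
    else
      let visited' := PySem.Set.add visited (row, col)
      let path' := path ++ [(row, col)]
      -- the four-direction loop [(0,1),(0,-1),(1,0),(-1,0)], unrolled; paths.extend = ++
      (if pvNbOk grid row (col + 1) then dfs grid row (col + 1) visited' path' else []) ++
      ((if pvNbOk grid row (col - 1) then dfs grid row (col - 1) visited' path' else []) ++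
      ((if pvNbOk grid (row + 1) col then dfs grid (row + 1) col visited' path' else []) ++
      (if pvNbOk grid (row - 1) col then dfs grid (row - 1) col visited' path' else [])))
termination_by pvMeas grid visited
decreasing_by
  all_goals
    have hnm : visited.contains (row, col) = false := by
      simpa using fun h1 => hv (Or.inr (Or.inr h1))
    have := pvMeas_append_lt h hnm
    simpa [PySem.Set.add, show (row, col) ∉ visited by simpa using hnm] using this

-- ===== PORT B =====
-- free = len([c for r in grid for c in r if c == 0])
def altFree (grid : List (List Int)) : Int :=
  (((grid.flatMap (fun r => r)).filter (fun c => c == 0)).length : Int)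

-- 0 <= nr < rows and 0 <= nc < cols and grid[nr][nc] != 1
-- (the double getD read is exact inside Pre_dfs, where no row is shorter than row 0)
def altOpen (grid : List (List Int)) (rows cols : Nat) (nr nc : Int) : Bool :=
  if 0 ≤ nr ∧ nr < (rows : Int) ∧ 0 ≤ nc ∧ nc < (cols : Int) then
    ((grid.getD nr.toNat []).getD nc.toNat 0) != 1
  else false

-- grid[r][c], fetched row first (none = IndexError)
def altCell (grid : List (List Int)) (r c : Int) : Option Int :=
  match PySem.List.pyGet? grid r with
  | none => none
  | some rw => PySem.List.pyGet? rw c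

theorem altCell_eq_pvCellAt (grid : List (List Int)) (r c : Int) :
    altCell grid r c = pvCellAt grid r c := by
  unfold altCell pvCellAt
  cases PySem.List.pyGet? grid r <;> rfl

def altStackMeas (grid : List (List Int)) (st : List (Int × Int × List (Int × Int) × List (Int × Int))) : Nat :=
  st.foldr (fun f n => 5 ^ pvMeas grid f.2.2.1 + n) 0

theorem altFoldl_push_le (grid : List (List Int)) (vis' : List (Int × Int))
    (F : Int × Int → Int × Int × List (Int × Int) × List (Int × Int))
    (hF : ∀ d, (F d).2.2.1 = vis') (ok : Int × Int → Bool)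
    (dirs : List (Int × Int)) (st : List (Int × Int × List (Int × Int) × List (Int × Int))) :
    altStackMeas grid (dirs.foldl (fun st d => if ok d then F d :: st else st) st) ≤
      dirs.length * 5 ^ pvMeas grid vis' + altStackMeas grid st := by
  induction dirs generalizing st with
  | nil => simp
  | cons d ds ih =>
    simp only [List.foldl_cons, List.length_cons, Nat.succ_mul]
    refine le_trans (ih _) ?_
    cases hok : ok d
    · simp only [hok, Bool.false_eq_true, if_false]
      exact Nat.add_le_add_right (Nat.le_add_right _ _) _
    · simp only [hok, if_true, altStackMeas, List.foldr_cons, hF d]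
      exact Nat.le_of_eq (Nat.add_assoc _ _ _).symm

theorem altPush_meas_lt {grid : List (List Int)} {r c : Int} {cell : Int}
    {vis p : List (Int × Int)} {rest : List (Int × Int × List (Int × Int) × List (Int × Int))}
    (h : pvCellAt grid r c = some cell) (hnm : vis.contains (r, c) = false) (rows cols : Nat) :
    altStackMeas grid
        ([((-1 : Int), (0 : Int)), (1, 0), (0, -1), (0, 1)].foldl
          (fun st d =>
            if altOpen grid rows cols (r + d.1) (c + d.2) then
              (r + d.1, c + d.2, vis.concat (r, c), p.concat (r, c)) :: st
            else st)
          rest) <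
      altStackMeas grid ((r, c, vis, p) :: rest) := by
  have hb := altFoldl_push_le grid (vis.concat (r, c))
    (fun d => (r + d.1, c + d.2, vis.concat (r, c), p.concat (r, c))) (fun _ => rfl)
    (fun d => altOpen grid rows cols (r + d.1) (c + d.2))
    [((-1 : Int), (0 : Int)), (1, 0), (0, -1), (0, 1)] rest
  have hlt : pvMeas grid (vis.concat (r, c)) < pvMeas grid vis := by
    rw [List.concat_eq_append]; exact pvMeas_append_lt h hnm
  have hw : 5 * 5 ^ pvMeas grid (vis.concat (r, c)) ≤ 5 ^ pvMeas grid vis := by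
    calc 5 * 5 ^ pvMeas grid (vis.concat (r, c))
        = 5 ^ (pvMeas grid (vis.concat (r, c)) + 1) := by ring
      _ ≤ 5 ^ pvMeas grid vis := Nat.pow_le_pow_right (by norm_num) (by omega)
  have he : 0 < 5 ^ pvMeas grid (vis.concat (r, c)) := by positivity
  have hlen : ([((-1 : Int), (0 : Int)), (1, 0), (0, -1), (0, 1)] : List (Int × Int)).length = 4 := rfl
  rw [hlen] at hb
  calc altStackMeas grid
        ([((-1 : Int), (0 : Int)), (1, 0), (0, -1), (0, 1)].foldl
          (fun st d =>
            if altOpen grid rows cols (r + d.1) (c + d.2) then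
              (r + d.1, c + d.2, vis.concat (r, c), p.concat (r, c)) :: st
            else st)
          rest)
      ≤ 4 * 5 ^ pvMeas grid (vis.concat (r, c)) + altStackMeas grid rest := hb
    _ < 5 * 5 ^ pvMeas grid (vis.concat (r, c)) + altStackMeas grid rest := by omega
    _ ≤ 5 ^ pvMeas grid vis + altStackMeas grid rest := Nat.add_le_add_right hw _
    _ = altStackMeas grid ((r, c, vis, p) :: rest) := rfl

theorem altRest_meas_lt (grid : List (List Int)) (f : Int × Int × List (Int × Int) × List (Int × Int))
    (rest : List (Int × Int × List (Int × Int) × List (Int × Int))) :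
    altStackMeas grid rest < altStackMeas grid (f :: rest) := by
  simp only [altStackMeas, List.foldr_cons]
  exact Nat.lt_add_of_pos_left (by positivity)

-- the while-loop over the explicit frame stack (Lean list head = Python top of stack)
def altLoop (grid : List (List Int)) (free : Int) (rows cols : Nat)
    (stack : List (Int × Int × List (Int × Int) × List (Int × Int)))
    (out : List (List (Int × Int))) : List (List (Int × Int)) :=
  match stack with
  | [] => out
  | (r, c, vis, p) :: rest =>
    match hx : altCell grid r c with
    | none => altLoop grid free rows cols rest out  -- Python raises IndexError; outside Pre_dfs
    | some cell =>
      if cell == 3 then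
        if (p.length : Int) == free + 1 then
          altLoop grid free rows cols rest (out.concat (p.concat (r, c)))
        else
          altLoop grid free rows cols rest out
      else if hsk : cell == 1 || vis.any (fun q => q == (r, c)) then
        altLoop grid free rows cols rest out
      else
        -- push the four neighbours in order [(-1,0),(1,0),(0,-1),(0,1)]
        altLoop grid free rows cols
          ([((-1 : Int), (0 : Int)), (1, 0), (0, -1), (0, 1)].foldl
            (fun st d =>
              if altOpen grid rows cols (r + d.1) (c + d.2) then
                (r + d.1, c + d.2, vis.concat (r, c), p.concat (r, c)) :: st
              else st)
            rest) out
termination_by altStackMeas grid stack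
decreasing_by
  · exact altRest_meas_lt grid _ rest
  · exact altRest_meas_lt grid _ rest
  · exact altRest_meas_lt grid _ rest
  · exact altRest_meas_lt grid _ rest
  · have hcell : pvCellAt grid r c = some cell := by
      rw [← altCell_eq_pvCellAt]; exact hx
    have hsk' : ¬cell = 1 ∧ (r, c) ∉ vis := by simpa using hsk
    have hnm : vis.contains (r, c) = false := by simpa using hsk'.2
    exact altPush_meas_lt hcell hnm rows cols

def dfs_alt (grid : List (List Int)) (row : Int) (col : Int) (visited : List (Int × Int)) (path : List (Int × Int)) : List (List (Int × Int)) :=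
  let free := altFree grid
  let rows := grid.length
  let cols := (grid.headD []).length  -- len(grid[0]) if grid else 0
  altLoop grid free rows cols [(row, col, visited, path)] []

-- ===== PRECONDITION & SPEC =====
-- Pre_ excludes exactly the inputs our differential domain must avoid because Python A raises
-- IndexError: out-of-range start indices, and ragged grids with some row shorter than row 0
-- (the neighbour reads grid[nr][nc] can hit a short row).  This also excludes some ragged grids
-- on which A happens to return because walls block every path into the short row (see cites).
def Pre_dfs (grid : List (List Int)) (row : Int) (col : Int) (visited : List (Int × Int)) (path : List (Int × Int)) : Prop :=
  (∀ rw ∈ grid, (grid.headD []).length ≤ rw.length) ∧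
  (PySem.List.pyGet? grid row).isSome = true ∧
  (∀ rw ∈ (PySem.List.pyGet? grid row).toList, -(rw.length : Int) ≤ col ∧ col < rw.length)
instance (grid : List (List Int)) (row : Int) (col : Int) (visited : List (Int × Int)) (path : List (Int × Int)) : Decidable (Pre_dfs grid row col visited path) := by unfold Pre_dfs; infer_instance

def pvWitness_dfs : List (List Int) × Int × Int × (List (Int × Int)) × (List (Int × Int)) :=
  ([[0, 3], [0, 0]], 0, 0, [], [])

def Spec_dfs (grid : List (List Int)) (row : Int) (col : Int) (visited : List (Int × Int)) (path : List (Int × Int)) (out : List (List (Int × Int))) : Prop := out = dfs_alt grid row col visited path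
instance (grid : List (List Int)) (row : Int) (col : Int) (visited : List (Int × Int)) (path : List (Int × Int)) (out : List (List (Int × Int))) : Decidable (Spec_dfs grid row col visited path out) := by unfold Spec_dfs; infer_instance

-- ===== CLAIM (what is proved, stated in full; the proofs are below) =====
def Claim_equal_dfs : Prop := ∀ (grid : List (List Int)) (row : Int) (col : Int) (visited : List (Int × Int)) (path : List (Int × Int)), Dom_dfs grid row col visited path → Pre_dfs grid row col visited path → Spec_dfs grid row col visited path (dfs grid row col visited path)

-- ===== LEMMAS AND PROOFS =====
theorem altFree_eq (grid : List (List Int)) : altFree grid = pvCountFree grid := by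
  unfold altFree pvCountFree
  suffices h : ∀ (g : List (List Int)) (s : Int),
      g.foldl (fun s rw => rw.foldl (fun s cell => if cell = 0 then s + 1 else s) s) s
        = s + (((g.flatMap (fun r => r)).filter (fun c => c == 0)).length : Int) by
    simpa using (h grid 0).symm
  have hinner : ∀ (rw : List Int) (s : Int),
      rw.foldl (fun s cell => if cell = 0 then s + 1 else s) s
        = s + ((rw.filter (fun c => c == 0)).length : Int) := by
    intro rw
    induction rw with
    | nil => simp
    | cons a t ih =>
      intro s
      by_cases ha : a = 0 <;> simp [ha, ih] <;> push_cast <;> ring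
  intro g
  induction g with
  | nil => simp
  | cons rw t ih =>
    intro s
    simp only [List.foldl_cons, List.flatMap_cons, List.filter_append, List.length_append]
    rw [hinner, ih]
    push_cast
    ring

theorem altOpen_eq (grid : List (List Int))
    (Hrect : ∀ rw ∈ grid, (grid.headD []).length ≤ rw.length) (nr nc : Int) :
    altOpen grid grid.length (grid.headD []).length nr nc = pvNbOk grid nr nc := by
  unfold altOpen pvNbOk
  by_cases hb : 0 ≤ nr ∧ nr < (grid.length : Int) ∧ 0 ≤ nc ∧ nc < ((grid.headD []).length : Int)
  · obtain ⟨h1, h2, h3, h4⟩ := hb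
    rw [if_pos ⟨h1, h2, h3, h4⟩]
    obtain ⟨rw_, hrw⟩ : ∃ rw_, grid[nr.toNat]? = some rw_ := by
      refine ⟨grid[nr.toNat], ?_⟩
      exact List.getElem?_eq_getElem (by omega)
    have hrow : PySem.List.pyGet? grid nr = some rw_ := by
      rw [PySem.List.pyGet?_of_nonneg _ h1]; exact hrw
    have hmem : rw_ ∈ grid := PySem.List.mem_of_pyGet?_eq_some _ hrow
    have hlen : (grid.headD []).length ≤ rw_.length := Hrect _ hmem
    obtain ⟨x, hx⟩ : ∃ x, rw_[nc.toNat]? = some x := by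
      refine ⟨rw_[nc.toNat]'(by omega), ?_⟩
      exact List.getElem?_eq_getElem (by omega)
    have hcol : PySem.List.pyGet? rw_ nc = some x := by
      rw [PySem.List.pyGet?_of_nonneg _ h3]; exact hx
    have hcell : pvCellAt grid nr nc = some x := by simp [pvCellAt, hrow, hcol]
    have hg1 : grid.getD nr.toNat [] = rw_ := by simp [List.getD, hrw]
    have hg2 : rw_.getD nc.toNat 0 = x := by simp [List.getD, hx]
    have hgoal : (grid.getD nr.toNat []).getD nc.toNat 0 = x := by rw [hg1, hg2]
    rw [hgoal]
    simp only [List.headD_eq_head?_getD] at h4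
    simp [hcell, h1, h2, h3, h4, bne]
  · rw [if_neg hb]
    push_neg at hb
    by_cases h1 : 0 ≤ nr <;> by_cases h2 : nr < (grid.length : Int) <;>
      by_cases h3 : 0 ≤ nc <;> simp_all <;> omega

theorem dfs_none {grid : List (List Int)} {r c : Int} {vis p : List (Int × Int)}
    (h : pvCellAt grid r c = none) : dfs grid r c vis p = [] := by
  rw [dfs]; split <;> simp_all

theorem dfs_term {grid : List (List Int)} {r c : Int} {vis p : List (Int × Int)} {cell : Int}
    (h : pvCellAt grid r c = some cell) (ht : cell = 3 ∧ (p.length : Int) = pvCountFree grid + 1) :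
    dfs grid r c vis p = [p ++ [(r, c)]] := by
  rw [dfs]; split <;> simp_all

theorem dfs_skip {grid : List (List Int)} {r c : Int} {vis p : List (Int × Int)} {cell : Int}
    (h : pvCellAt grid r c = some cell) (ht : ¬ (cell = 3 ∧ (p.length : Int) = pvCountFree grid + 1))
    (hv : cell = 1 ∨ cell = 3 ∨ vis.contains (r, c) = true) :
    dfs grid r c vis p = [] := by
  rw [dfs]; split
  · simp_all
  · next cell' heq =>
    rw [h] at heq; cases heq
    rw [if_neg ht, dif_pos hv]

theorem dfs_push {grid : List (List Int)} {r c : Int} {vis p : List (Int × Int)} {cell : Int}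
    (h : pvCellAt grid r c = some cell) (ht : ¬ (cell = 3 ∧ (p.length : Int) = pvCountFree grid + 1))
    (hv : ¬ (cell = 1 ∨ cell = 3 ∨ vis.contains (r, c) = true)) :
    dfs grid r c vis p =
      (if pvNbOk grid r (c + 1) then dfs grid r (c + 1) (PySem.Set.add vis (r, c)) (p ++ [(r, c)]) else []) ++
      ((if pvNbOk grid r (c - 1) then dfs grid r (c - 1) (PySem.Set.add vis (r, c)) (p ++ [(r, c)]) else []) ++
      ((if pvNbOk grid (r + 1) c then dfs grid (r + 1) c (PySem.Set.add vis (r, c)) (p ++ [(r, c)]) else []) ++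
      (if pvNbOk grid (r - 1) c then dfs grid (r - 1) c (PySem.Set.add vis (r, c)) (p ++ [(r, c)]) else []))) := by
  conv_lhs => rw [dfs]
  split
  · simp_all
  · next cell' heq =>
    rw [h] at heq; cases heq
    rw [if_neg ht, dif_neg hv]


theorem altLoop_noneC {grid : List (List Int)} {free : Int} {rows cols : Nat} {r c : Int}
    {vis p : List (Int × Int)} {rest : List (Int × Int × List (Int × Int) × List (Int × Int))}
    {out : List (List (Int × Int))} (hx : altCell grid r c = none) :
    altLoop grid free rows cols ((r, c, vis, p) :: rest) out = altLoop grid free rows cols rest out := by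
  rw [altLoop]; split <;> simp_all

theorem altLoop_emit {grid : List (List Int)} {free : Int} {rows cols : Nat} {r c : Int}
    {vis p : List (Int × Int)} {rest : List (Int × Int × List (Int × Int) × List (Int × Int))}
    {out : List (List (Int × Int))} {cell : Int}
    (hx : altCell grid r c = some cell) (h3 : cell = 3) (hlen : (p.length : Int) = free + 1) :
    altLoop grid free rows cols ((r, c, vis, p) :: rest) out =
      altLoop grid free rows cols rest (out.concat (p.concat (r, c))) := by
  rw [altLoop]; split
  · simp_all
  · next cell2 heq =>
    rw [hx] at heq; cases heq
    rw [if_pos (by simpa using h3), if_pos (by simpa using hlen)]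

theorem altLoop_skip3 {grid : List (List Int)} {free : Int} {rows cols : Nat} {r c : Int}
    {vis p : List (Int × Int)} {rest : List (Int × Int × List (Int × Int) × List (Int × Int))}
    {out : List (List (Int × Int))} {cell : Int}
    (hx : altCell grid r c = some cell) (h3 : cell = 3) (hlen : ¬ (p.length : Int) = free + 1) :
    altLoop grid free rows cols ((r, c, vis, p) :: rest) out = altLoop grid free rows cols rest out := by
  rw [altLoop]; split
  · simp_all
  · next cell2 heq =>
    rw [hx] at heq; cases heq
    rw [if_pos (by simpa using h3), if_neg (by simpa using hlen)]

theorem altLoop_skip {grid : List (List Int)} {free : Int} {rows cols : Nat} {r c : Int}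
    {vis p : List (Int × Int)} {rest : List (Int × Int × List (Int × Int) × List (Int × Int))}
    {out : List (List (Int × Int))} {cell : Int}
    (hx : altCell grid r c = some cell) (h3 : ¬ cell = 3)
    (hsk : (cell == 1 || vis.any (fun q => q == (r, c))) = true) :
    altLoop grid free rows cols ((r, c, vis, p) :: rest) out = altLoop grid free rows cols rest out := by
  rw [altLoop]; split
  · simp_all
  · next cell2 heq =>
    rw [hx] at heq; cases heq
    rw [if_neg (by simpa using h3), dif_pos hsk]

theorem altLoop_push {grid : List (List Int)} {free : Int} {rows cols : Nat} {r c : Int}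
    {vis p : List (Int × Int)} {rest : List (Int × Int × List (Int × Int) × List (Int × Int))}
    {out : List (List (Int × Int))} {cell : Int}
    (hx : altCell grid r c = some cell) (h3 : ¬ cell = 3)
    (hsk : ¬ (cell == 1 || vis.any (fun q => q == (r, c))) = true) :
    altLoop grid free rows cols ((r, c, vis, p) :: rest) out =
      altLoop grid free rows cols
        ([((-1 : Int), (0 : Int)), (1, 0), (0, -1), (0, 1)].foldl
          (fun st d =>
            if altOpen grid rows cols (r + d.1) (c + d.2) then
              (r + d.1, c + d.2, vis.concat (r, c), p.concat (r, c)) :: st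
            else st)
          rest) out := by
  conv_lhs => rw [altLoop]
  split
  · simp_all
  · next cell2 heq =>
    rw [hx] at heq; cases heq
    rw [if_neg (by simpa using h3), dif_neg hsk]

theorem altLoop_eq (grid : List (List Int))
    (Hrect : ∀ rw ∈ grid, (grid.headD []).length ≤ rw.length)
    (stack : List (Int × Int × List (Int × Int) × List (Int × Int)))
    (out : List (List (Int × Int))) :
    altLoop grid (pvCountFree grid) grid.length (grid.headD []).length stack out =
      out ++ (stack.map (fun f => dfs grid f.1 f.2.1 f.2.2.1 f.2.2.2)).flatten := by
  induction stack, out using altLoop.induct grid (pvCountFree grid) grid.length (grid.headD []).length with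
  | case1 out => rw [altLoop]; simp
  | case2 out r c vis p rest hx ih =>
    have hcell : pvCellAt grid r c = none := by rw [← altCell_eq_pvCellAt]; exact hx
    rw [altLoop_noneC hx, ih]
    simp [dfs_none hcell]
  | case3 out r c vis p rest cell hx h3 hlen ih =>
    have hcell : pvCellAt grid r c = some cell := by rw [← altCell_eq_pvCellAt]; exact hx
    have ht : cell = 3 ∧ (p.length : Int) = pvCountFree grid + 1 :=
      ⟨by simpa using h3, by simpa using hlen⟩
    rw [altLoop_emit hx ht.1 ht.2, ih]
    simp [dfs_term hcell ht]
  | case4 out r c vis p rest cell hx h3 hlen ih =>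
    have hcell : pvCellAt grid r c = some cell := by rw [← altCell_eq_pvCellAt]; exact hx
    have ht : ¬ (cell = 3 ∧ (p.length : Int) = pvCountFree grid + 1) := by
      rintro ⟨-, h2⟩
      exact (by simpa using hlen : ¬ (p.length : Int) = pvCountFree grid + 1) h2
    rw [altLoop_skip3 hx (by simpa using h3) (by simpa using hlen), ih]
    simp [dfs_skip hcell ht (Or.inr (Or.inl (by simpa using h3)))]
  | case5 out r c vis p rest cell hx h3 hsk ih =>
    have hcell : pvCellAt grid r c = some cell := by rw [← altCell_eq_pvCellAt]; exact hx
    have h3' : ¬ cell = 3 := by simpa using h3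
    have ht : ¬ (cell = 3 ∧ (p.length : Int) = pvCountFree grid + 1) := by
      rintro ⟨h1, -⟩; exact h3' h1
    have hv : cell = 1 ∨ cell = 3 ∨ vis.contains (r, c) = true := by
      rcases Bool.or_eq_true_iff.1 hsk with h | h
      · exact Or.inl (by simpa using h)
      · have hmem : (r, c) ∈ vis := by simpa using h
        exact Or.inr (Or.inr (by simpa using hmem))
    rw [altLoop_skip hx h3' hsk, ih]
    simp [dfs_skip hcell ht hv]
  | case6 out r c vis p rest cell hx h3 hsk ih =>
    have hcell : pvCellAt grid r c = some cell := by rw [← altCell_eq_pvCellAt]; exact hx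
    have h3' : ¬ cell = 3 := by simpa using h3
    have ht : ¬ (cell = 3 ∧ (p.length : Int) = pvCountFree grid + 1) := by
      rintro ⟨h1, -⟩; exact h3' h1
    have hsk' : ¬cell = 1 ∧ (r, c) ∉ vis := by simpa using hsk
    have hnm : (r, c) ∉ vis := hsk'.2
    have hv : ¬ (cell = 1 ∨ cell = 3 ∨ vis.contains (r, c) = true) := by
      rintro (h | h | h)
      · exact hsk'.1 h
      · exact h3' h
      · exact hnm (by simpa using h)
    have hset : PySem.Set.add vis (r, c) = vis ++ [(r, c)] := by
      simp [PySem.Set.add, hnm]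
    simp only [dite_eq_ite] at ih
    rw [altLoop_push hx h3' hsk, ih]
    simp only [List.map_cons, List.flatten_cons]
    rw [dfs_push hcell ht hv]
    simp only [List.foldl_cons, List.foldl_nil, List.concat_eq_append,
      altOpen_eq grid Hrect, hset, add_zero, ← sub_eq_add_neg]
    split_ifs <;> simp
  termination_by altStackMeas grid stack

-- ===== VERDICT (by name: the statement is the Claim_ definition above) =====
theorem dfs_spec : Claim_equal_dfs := by
  intro grid row col visited path _ hpre
  unfold Spec_dfs dfs_alt
  rw [altFree_eq, altLoop_eq grid hpre.1]
  simp
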